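-- pv_equiv track=rewrite | github.com/ralitsalyka/Programming-101-Python | week03/Polynomial/utls.py | find_coefficients
-- ===== SOURCE A (Python) =====
-- def find_coefficients(string):
-- 	cons=[]
-- 	cons_str=""
-- 	i=0
-- 	str_len=len(string)
-- 	if string[0]=='x':
-- 		cons_str='1'
-- 	while i < str_len :
-- 		if string[i]=='*' or string[i]=='x' :
-- 			break
-- 		else:
-- 			cons_str=cons_str + string[i]
-- 		i=i+1
-- 	return cons_str
-- ===== SOURCE B (Python) =====
-- def find_coefficients(string):
--     if string[0] == 'x':
--         return '1'
--     candidates = [p for p in (string.find('x'), string.find('*')) if p >= 0]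
--     pos = min(candidates) if candidates else len(string)
--     return string[:pos]
-- ===== Notes on version B (the rewrite author's own statement) =====
-- stated objective: faster
-- what changed: Replaced the index/accumulator while-loop, which grows the result by repeated string concatenation (quadratic), with a locate-then-slice decomposition: take the smallest non-negative of string.find('x') and string.find('*') (or len(string) if neither occurs) and return string[:pos].
import Mathlib
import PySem

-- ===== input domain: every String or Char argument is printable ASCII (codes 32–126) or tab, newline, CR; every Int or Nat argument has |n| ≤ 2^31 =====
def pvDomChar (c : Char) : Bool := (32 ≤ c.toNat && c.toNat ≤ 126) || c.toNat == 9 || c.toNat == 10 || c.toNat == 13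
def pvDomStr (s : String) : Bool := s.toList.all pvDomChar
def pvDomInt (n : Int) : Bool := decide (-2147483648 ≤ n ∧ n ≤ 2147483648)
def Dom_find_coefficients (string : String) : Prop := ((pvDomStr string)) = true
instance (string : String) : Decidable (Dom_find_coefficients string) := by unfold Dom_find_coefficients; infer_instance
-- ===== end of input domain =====

-- B replaces A's accumulator while-loop (repeated string concatenation) by locate-the-first-delimiter-then-slice; measured faster in a timing run.

-- ===== PORT A =====
-- A's while-loop: walks the remaining characters, appending to the accumulator, breaking at '*' or 'x'
def pvALoop : List Char → List Char → List Char
  | [], acc => acc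
  | c :: rest, acc => if c = '*' ∨ c = 'x' then acc else pvALoop rest (acc ++ [c])

def find_coefficients (string : String) : String :=
  let cons_str : List Char := if PySem.Str.pyGet? string 0 = some 'x' then ['1'] else []
  String.ofList (pvALoop string.toList cons_str)

-- ===== PORT B =====
def find_coefficients_alt (string : String) : String :=
  if PySem.Str.pyGet? string 0 = some 'x' then "1"
  else
    let candidates := [PySem.Str.find string "x", PySem.Str.find string "*"].filter (fun p => decide (0 ≤ p))
    let pos : Int := match candidates.min? with
      | some m => m
      | none => PySem.Str.len string
    PySem.Str.slice string none (some pos)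

-- ===== PRECONDITION & SPEC =====
-- Pre_ excludes only the empty string, on which A raises IndexError (string[0]).
def Pre_find_coefficients (string : String) : Prop := string ≠ ""
instance (string : String) : Decidable (Pre_find_coefficients string) := by unfold Pre_find_coefficients; infer_instance
def pvWitness_find_coefficients : String := "3*x"

def Spec_find_coefficients (string : String) (out : String) : Prop := out = find_coefficients_alt string
instance (string : String) (out : String) : Decidable (Spec_find_coefficients string out) := by unfold Spec_find_coefficients; infer_instance

-- ===== CLAIM (what is proved, stated in full; the proofs are below) =====
def Claim_equal_find_coefficients : Prop := ∀ (string : String), Dom_find_coefficients string → Pre_find_coefficients string → Spec_find_coefficients string (find_coefficients string)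

-- ===== LEMMAS AND PROOFS =====

-- the break test of A, negated (the characters the loop keeps)
def pvq (c : Char) : Bool := !(c == '*' || c == 'x')

theorem pvALoop_eq (cs : List Char) : ∀ acc, pvALoop cs acc = acc ++ cs.takeWhile pvq := by
  induction cs with
  | nil => intro acc; simp [pvALoop]
  | cons c rest ih =>
    intro acc
    by_cases h : c = '*' ∨ c = 'x'
    · have hq : pvq c = false := by
        rcases h with h | h <;> simp [pvq, h]
      simp [pvALoop, h, hq]
    · have hq : pvq c = true := by
        simp [pvq]; push_neg at h; exact ⟨h.1, h.2⟩
      simp [pvALoop, h, hq, ih]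

-- take n equals takeWhile q when q holds strictly before n and fails at n (if n is interior)
theorem pv_take_eq_takeWhile (q : Char → Bool) :
    ∀ (cs : List Char) (n : Nat), n ≤ cs.length →
    (∀ i, i < n → ∀ (h : i < cs.length), q cs[i] = true) →
    (∀ (h : n < cs.length), q cs[n] = false) →
    cs.take n = cs.takeWhile q := by
  intro cs
  induction cs with
  | nil => intro n hle _ _; simp at hle; simp [hle]
  | cons c rest ih =>
    intro n hle hq hstop
    cases n with
    | zero =>
      have : q c = false := hstop (by simp)
      simp [this]
    | succ m =>
      have hqc : q c = true := hq 0 (Nat.succ_pos m) (by simp)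
      simp only [List.take_succ_cons, List.takeWhile_cons, hqc, if_true]
      rw [ih m (by simpa using hle)
        (fun i hi h => by simpa using hq (i+1) (by omega) (by simpa using h))
        (fun h => by simpa using hstop (by simpa using h))]

-- a singleton prefix of a drop reads one character
theorem pv_single_prefix (cs : List Char) (i : Nat) (a : Char) :
    ([a] <+: cs.drop i) ↔ cs[i]? = some a := by
  rw [List.cons_prefix_iff]
  constructor
  · rintro ⟨r, hr, -⟩
    have : (cs.drop i).head? = some a := by rw [hr]; rfl
    simpa [List.head?_drop] using this
  · intro h
    have hh : (cs.drop i).head? = some a := by simpa [List.head?_drop] using h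
    rcases hd : cs.drop i with _ | ⟨b, t⟩
    · rw [hd] at hh; simp at hh
    · rw [hd] at hh; simp at hh
      exact ⟨t, by rw [hh], List.nil_prefix⟩

-- what Chars.find of a single character says
theorem pv_find_neg (cs : List Char) (a : Char) (h : PySem.Chars.find cs [a] = -1) :
    ∀ i : Nat, cs[i]? ≠ some a := by
  intro i hi
  have hmem : a ∈ cs := List.mem_of_getElem? hi
  have : ¬ [a] <:+: cs := (PySem.Chars.find_eq_neg_one_iff cs [a]).mp h
  exact this ((List.singleton_infix_iff a cs).mpr hmem)

theorem pv_find_pos (cs : List Char) (a : Char) (h : 0 ≤ PySem.Chars.find cs [a]) :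
    cs[(PySem.Chars.find cs [a]).toNat]? = some a ∧
    ∀ i < (PySem.Chars.find cs [a]).toNat, cs[i]? ≠ some a := by
  obtain ⟨hpre, hmin⟩ := PySem.Chars.find_spec h
  exact ⟨(pv_single_prefix cs _ a).mp hpre,
    fun i hi hx => hmin i hi ((pv_single_prefix cs i a).mpr hx)⟩

-- the B-side position computation, on the list level
def pvPos (cs : List Char) : Int :=
  let candidates := [PySem.Chars.find cs ['x'], PySem.Chars.find cs ['*']].filter (fun p => decide (0 ≤ p))
  match candidates.min? with
  | some m => m
  | none => (cs.length : Int)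

theorem pvPos_spec (cs : List Char) :
    0 ≤ pvPos cs ∧ (pvPos cs).toNat ≤ cs.length ∧
    (∀ i, i < (pvPos cs).toNat → cs[i]? ≠ some 'x' ∧ cs[i]? ≠ some '*') ∧
    (∀ _ : (pvPos cs).toNat < cs.length,
      cs[(pvPos cs).toNat]? = some 'x' ∨ cs[(pvPos cs).toNat]? = some '*') := by
  have hx1 := PySem.Chars.neg_one_le_find cs ['x']
  have hs1 := PySem.Chars.neg_one_le_find cs ['*']
  have hxl := PySem.Chars.find_le_length cs ['x']
  have hsl := PySem.Chars.find_le_length cs ['*']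
  by_cases hx : 0 ≤ PySem.Chars.find cs ['x'] <;>
  by_cases hs : 0 ≤ PySem.Chars.find cs ['*']
  · -- both found: pos = min
    obtain ⟨hxat, hxmin⟩ := pv_find_pos cs 'x' hx
    obtain ⟨hsat, hsmin⟩ := pv_find_pos cs '*' hs
    have hpos : pvPos cs = min (PySem.Chars.find cs ['x']) (PySem.Chars.find cs ['*']) := by
      simp [pvPos, hx, hs, List.min?]
    rw [hpos]
    refine ⟨by omega, by omega, ?_, ?_⟩
    · intro i hi
      exact ⟨hxmin i (by omega), hsmin i (by omega)⟩
    · intro _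
      rcases le_total (PySem.Chars.find cs ['x']) (PySem.Chars.find cs ['*']) with h | h
      · left; rw [min_eq_left h]; exact hxat
      · right; rw [min_eq_right h]; exact hsat
  · obtain ⟨hxat, hxmin⟩ := pv_find_pos cs 'x' hx
    have hsn : PySem.Chars.find cs ['*'] = -1 := by omega
    have hpos : pvPos cs = PySem.Chars.find cs ['x'] := by
      simp [pvPos, hx, hs, List.min?]
    rw [hpos]
    refine ⟨hx, by omega, ?_, fun _ => Or.inl hxat⟩
    intro i hi
    exact ⟨hxmin i hi, pv_find_neg cs '*' hsn i⟩
  · obtain ⟨hsat, hsmin⟩ := pv_find_pos cs '*' hs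
    have hxn : PySem.Chars.find cs ['x'] = -1 := by omega
    have hpos : pvPos cs = PySem.Chars.find cs ['*'] := by
      simp [pvPos, hx, hs, List.min?]
    rw [hpos]
    refine ⟨hs, by omega, ?_, fun _ => Or.inr hsat⟩
    intro i hi
    exact ⟨pv_find_neg cs 'x' hxn i, hsmin i hi⟩
  · have hxn : PySem.Chars.find cs ['x'] = -1 := by omega
    have hsn : PySem.Chars.find cs ['*'] = -1 := by omega
    have hpos : pvPos cs = (cs.length : Int) := by
      simp [pvPos, hx, hs, List.min?]
    rw [hpos]
    refine ⟨by positivity, by simp, ?_, fun h => absurd h (by simp)⟩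
    intro i hi
    exact ⟨pv_find_neg cs 'x' hxn i, pv_find_neg cs '*' hsn i⟩

theorem pv_main (cs : List Char) : cs.takeWhile pvq = cs.take (pvPos cs).toNat := by
  obtain ⟨h0, hle, hbefore, hat⟩ := pvPos_spec cs
  rw [pv_take_eq_takeWhile pvq cs (pvPos cs).toNat hle ?_ ?_]
  · intro i hi h
    obtain ⟨hx, hs⟩ := hbefore i hi
    simp only [List.getElem?_eq_getElem h] at hx hs
    simp [pvq]
    exact ⟨fun e => hs (by rw [e]), fun e => hx (by rw [e])⟩
  · intro h
    rcases hat h with hc | hc <;>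
    · simp only [List.getElem?_eq_getElem h, Option.some.injEq] at hc
      simp [pvq, hc]

-- ===== VERDICT (by name: the statement is the Claim_ definition above) =====
theorem find_coefficients_spec : Claim_equal_find_coefficients := by
  intro s _hdom _hpre
  unfold Spec_find_coefficients find_coefficients find_coefficients_alt
  by_cases hx0 : PySem.Str.pyGet? s 0 = some 'x'
  · -- leading 'x': the loop breaks immediately, the accumulator is ['1']
    have hget : PySem.Str.pyGet? s 0 = s.toList[(0:Nat)]? := by
      rw [show (0:Int) = ((0:Nat):Int) from rfl, PySem.Str.pyGet?_natCast]
    have h00 : s.toList[(0:Nat)]? = some 'x' := by rw [← hget]; exact hx0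
    have hlist : s.toList = 'x' :: s.toList.tail := by
      rcases hd : s.toList with _ | ⟨c, t⟩
      · rw [hd] at h00; simp at h00
      · rw [hd] at h00; simp at h00; simp [h00]
    simp only [hx0, if_true]
    rw [hlist]
    simp [pvALoop]
  · simp only [hx0, if_false]
    apply String.toList_inj.mp
    rw [String.toList_ofList, pvALoop_eq, List.nil_append, pv_main]
    have h0 : 0 ≤ pvPos s.toList := (pvPos_spec s.toList).1
    have hb : (PySem.Str.slice s none (some (pvPos s.toList))).toList
        = PySem.List.slice s.toList none (some (pvPos s.toList)) := by
      simp [PySem.Str.toList_slice]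
    simp only [PySem.Str.find_eq, PySem.Str.len_eq]
    show _ = (PySem.Str.slice s none (some (pvPos s.toList))).toList
    rw [hb, PySem.List.slice_to s.toList h0]
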